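-- pv_equiv track=rewrite | github.com/alex810918/antibody-tracker | scripts/fetch_category3.py | _classify_reason
-- ===== SOURCE A (Python) =====
-- def _classify_reason(why_stopped: str, status: str) -> tuple[str, str]:
--     """
--     Returns (failure_type, reason) based on why_stopped text and status.
--     failure_type: 'Sponsor withdrawal' | 'FDA rejection (CRL)' | 'Unknown'
--     """
--     if not why_stopped:
--         return "Sponsor withdrawal" if status == "WITHDRAWN" else "Unknown", \
--                "Reason not publicly disclosed"
--
--     ws_lower = why_stopped.lower()
--
--     # FDA-related keywords
--     if any(kw in ws_lower for kw in ["fda", "crl", "complete response", "refuse to file",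
--                                       "rtf", "regulatory", "agency"]):
--         return "FDA rejection (CRL)", why_stopped
--
--     # Safety signals
--     if any(kw in ws_lower for kw in ["safety", "adverse", "toxicity", "death", "serious"]):
--         return "Sponsor withdrawal", f"Safety concerns: {why_stopped}"
--
--     # Efficacy
--     if any(kw in ws_lower for kw in ["efficacy", "futility", "interim analysis",
--                                       "did not meet", "failed to", "lack of"]):
--         return "Sponsor withdrawal", f"Efficacy failure: {why_stopped}"
--
--     # Business
--     if any(kw in ws_lower for kw in ["business", "financial", "funding", "commercial",
--                                       "strategic", "portfolio"]):
--         return "Sponsor withdrawal", f"Business decision: {why_stopped}"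
--
--     # Enrollment
--     if any(kw in ws_lower for kw in ["enroll", "recruitment", "accrual", "feasibility"]):
--         return "Sponsor withdrawal", f"Enrollment issues: {why_stopped}"
--
--     return "Sponsor withdrawal", why_stopped
-- ===== SOURCE B (Python) =====
-- _GROUPS = [
--     ["fda", "crl", "complete response", "refuse to file", "rtf", "regulatory", "agency"],
--     ["safety", "adverse", "toxicity", "death", "serious"],
--     ["efficacy", "futility", "interim analysis", "did not meet", "failed to", "lack of"],
--     ["business", "financial", "funding", "commercial", "strategic", "portfolio"],
--     ["enroll", "recruitment", "accrual", "feasibility"],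
-- ]
-- # flat keyword -> priority index, built once
-- _KEYWORD_PRIORITY = [(kw, i) for i, kws in enumerate(_GROUPS) for kw in kws]
-- _OUTCOMES = [
--     ("FDA rejection (CRL)", ""),
--     ("Sponsor withdrawal", "Safety concerns: "),
--     ("Sponsor withdrawal", "Efficacy failure: "),
--     ("Sponsor withdrawal", "Business decision: "),
--     ("Sponsor withdrawal", "Enrollment issues: "),
-- ]
--
--
-- def _classify_reason(why_stopped: str, status: str) -> tuple[str, str]:
--     if not why_stopped:
--         return ("Sponsor withdrawal" if status == "WITHDRAWN" else "Unknown",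
--                 "Reason not publicly disclosed")
--     ws = why_stopped.lower()
--     # minimum priority among ALL matching keywords (no ordered group short-circuit);
--     # correct because the first matching group in A is exactly the minimal index here
--     best = min((i for kw, i in _KEYWORD_PRIORITY if kw in ws), default=None)
--     if best is None:
--         return "Sponsor withdrawal", why_stopped
--     failure_type, prefix = _OUTCOMES[best]
--     return failure_type, prefix + why_stopped
-- ===== Notes on version B (the rewrite author's own statement) =====
-- stated objective: alternative
-- what changed: Instead of an ordered chain of per-category any-keyword tests with short-circuit, B scans one flat keyword-to-priority list, takes the MINIMUM priority among all matching keywords, and looks the outcome up in a table; equal because A's first matching group is exactly the minimal matched index.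
import Mathlib
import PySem

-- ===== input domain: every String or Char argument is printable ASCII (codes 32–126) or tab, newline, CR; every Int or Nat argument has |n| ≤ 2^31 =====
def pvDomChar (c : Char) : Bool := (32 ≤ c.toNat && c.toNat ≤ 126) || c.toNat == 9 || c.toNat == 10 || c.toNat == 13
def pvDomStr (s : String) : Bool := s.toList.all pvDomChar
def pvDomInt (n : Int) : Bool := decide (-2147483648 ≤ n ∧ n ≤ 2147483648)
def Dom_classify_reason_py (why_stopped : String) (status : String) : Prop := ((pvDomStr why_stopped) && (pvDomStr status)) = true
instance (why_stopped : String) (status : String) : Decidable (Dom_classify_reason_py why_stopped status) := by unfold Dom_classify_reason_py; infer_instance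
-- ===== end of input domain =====

-- B replaces A's ordered chain of per-category keyword tests by a flat keyword->priority list whose MINIMUM matched priority selects the outcome from a table (objective: alternative); return values proved equal on all inputs.


-- ===== PORT A =====
def classify_reason_py (why_stopped : String) (status : String) : String × String :=
  if why_stopped = "" then
    ((if status = "WITHDRAWN" then "Sponsor withdrawal" else "Unknown"),
     "Reason not publicly disclosed")
  else
    let ws_lower := PySem.Str.lower why_stopped
    if (["fda", "crl", "complete response", "refuse to file", "rtf", "regulatory",
         "agency"].any (fun kw => PySem.Str.isIn kw ws_lower)) then
      ("FDA rejection (CRL)", why_stopped)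
    else if (["safety", "adverse", "toxicity", "death", "serious"].any
              (fun kw => PySem.Str.isIn kw ws_lower)) then
      ("Sponsor withdrawal", "Safety concerns: " ++ why_stopped)
    else if (["efficacy", "futility", "interim analysis", "did not meet", "failed to",
              "lack of"].any (fun kw => PySem.Str.isIn kw ws_lower)) then
      ("Sponsor withdrawal", "Efficacy failure: " ++ why_stopped)
    else if (["business", "financial", "funding", "commercial", "strategic",
              "portfolio"].any (fun kw => PySem.Str.isIn kw ws_lower)) then
      ("Sponsor withdrawal", "Business decision: " ++ why_stopped)
    else if (["enroll", "recruitment", "accrual", "feasibility"].any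
              (fun kw => PySem.Str.isIn kw ws_lower)) then
      ("Sponsor withdrawal", "Enrollment issues: " ++ why_stopped)
    else
      ("Sponsor withdrawal", why_stopped)

-- ===== PORT B =====
def pvGroups : List (List String) :=
  [["fda", "crl", "complete response", "refuse to file", "rtf", "regulatory", "agency"],
   ["safety", "adverse", "toxicity", "death", "serious"],
   ["efficacy", "futility", "interim analysis", "did not meet", "failed to", "lack of"],
   ["business", "financial", "funding", "commercial", "strategic", "portfolio"],
   ["enroll", "recruitment", "accrual", "feasibility"]]

-- _KEYWORD_PRIORITY = [(kw, i) for i, kws in enumerate(_GROUPS) for kw in kws]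
def pvKeywordPriority : List (String × Int) :=
  (PySem.List.enumerate pvGroups).flatMap (fun p => p.2.map (fun kw => (kw, p.1)))

def pvOutcomes : List (String × String) :=
  [("FDA rejection (CRL)", ""),
   ("Sponsor withdrawal", "Safety concerns: "),
   ("Sponsor withdrawal", "Efficacy failure: "),
   ("Sponsor withdrawal", "Business decision: "),
   ("Sponsor withdrawal", "Enrollment issues: ")]

-- option-valued minimum (Python min(..., default=None))
def pvOMin : Option Int → Option Int → Option Int
  | none, b => b
  | some i, none => some i
  | some i, some j => some (min i j)

-- min((i for kw, i in flat if kw in ws), default=None)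
def pvMinMatch (ws : String) : List (String × Int) → Option Int
  | [] => none
  | (kw, i) :: rest =>
      if PySem.Str.isIn kw ws then pvOMin (some i) (pvMinMatch ws rest)
      else pvMinMatch ws rest

def classify_reason_py_alt (why_stopped : String) (status : String) : String × String :=
  if why_stopped = "" then
    ((if status = "WITHDRAWN" then "Sponsor withdrawal" else "Unknown"),
     "Reason not publicly disclosed")
  else
    let ws := PySem.Str.lower why_stopped
    match pvMinMatch ws pvKeywordPriority with
    | none => ("Sponsor withdrawal", why_stopped)
    | some best =>
        let o := PySem.List.pyGetD pvOutcomes best ("", "")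
        (o.1, o.2 ++ why_stopped)

-- ===== PRECONDITION & SPEC =====
def Spec_classify_reason_py (why_stopped : String) (status : String) (out : String × String) : Prop := out = classify_reason_py_alt why_stopped status
instance (why_stopped : String) (status : String) (out : String × String) : Decidable (Spec_classify_reason_py why_stopped status out) := by unfold Spec_classify_reason_py; infer_instance

-- ===== CLAIM (what is proved, stated in full; the proofs are below) =====
def Claim_equal_classify_reason_py : Prop := ∀ (why_stopped : String) (status : String), Dom_classify_reason_py why_stopped status → Spec_classify_reason_py why_stopped status (classify_reason_py why_stopped status)

-- ===== LEMMAS AND PROOFS =====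
theorem pvOMin_assoc (a b c : Option Int) : pvOMin (pvOMin a b) c = pvOMin a (pvOMin b c) := by
  cases a <;> cases b <;> cases c <;> simp [pvOMin, min_assoc]

theorem pvMinMatch_append (ws : String) (xs ys : List (String × Int)) :
    pvMinMatch ws (xs ++ ys) = pvOMin (pvMinMatch ws xs) (pvMinMatch ws ys) := by
  induction xs with
  | nil => simp [pvMinMatch, pvOMin]
  | cons p rest ih =>
      obtain ⟨kw, i⟩ := p
      simp only [List.cons_append, pvMinMatch, ih]
      split
      · rw [pvOMin_assoc]
      · rfl

theorem pvMinMatch_const (ws : String) (i : Int) (kws : List String) :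
    pvMinMatch ws (kws.map (fun kw => (kw, i)))
      = if kws.any (fun kw => PySem.Str.isIn kw ws) then some i else none := by
  induction kws with
  | nil => simp [pvMinMatch]
  | cons kw rest ih =>
      simp only [List.map_cons, pvMinMatch, List.any_cons, ih]
      by_cases hA : PySem.Str.isIn kw ws = true <;>
      by_cases hB : (rest.any fun kw => PySem.Str.isIn kw ws) = true <;>
      simp only [hA, hB, if_pos, Bool.true_or, Bool.false_or, pvOMin, min_self] <;>
      simp_all [pvOMin]

theorem pvKeywordPriority_eq :
    pvKeywordPriority =
      (pvGroups[0]!.map (fun kw => (kw, (0 : Int)))) ++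
      (pvGroups[1]!.map (fun kw => (kw, (1 : Int)))) ++
      (pvGroups[2]!.map (fun kw => (kw, (2 : Int)))) ++
      (pvGroups[3]!.map (fun kw => (kw, (3 : Int)))) ++
      (pvGroups[4]!.map (fun kw => (kw, (4 : Int)))) := by
  decide

-- ===== VERDICT (by name: the statement is the Claim_ definition above) =====
theorem classify_reason_py_spec : Claim_equal_classify_reason_py := by
  intro why_stopped status _
  unfold Spec_classify_reason_py classify_reason_py classify_reason_py_alt
  by_cases hw : why_stopped = ""
  · simp [hw]
  · simp only [hw, if_false]
    rw [pvKeywordPriority_eq]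
    simp only [pvMinMatch_append, pvMinMatch_const]
    set ws := PySem.Str.lower why_stopped with hws
    by_cases h0 : pvGroups[0]!.any (fun kw => PySem.Str.isIn kw ws) = true <;>
    by_cases h1 : pvGroups[1]!.any (fun kw => PySem.Str.isIn kw ws) = true <;>
    by_cases h2 : pvGroups[2]!.any (fun kw => PySem.Str.isIn kw ws) = true <;>
    by_cases h3 : pvGroups[3]!.any (fun kw => PySem.Str.isIn kw ws) = true <;>
    by_cases h4 : pvGroups[4]!.any (fun kw => PySem.Str.isIn kw ws) = true <;>
    simp_all [pvGroups, pvOutcomes, pvOMin, PySem.List.pyGetD, PySem.List.pyGet?, PySem.List.pyIdx?]
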